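-- pv_equiv track=rewrite | github.com/JeremyMet/Mysterion128 | src/const_computation.py | powGF16
-- ===== SOURCE A (Python) =====
-- def multGF16(A, B):
--     ret = 0 ;
--     while(A > 0):
--         ret ^= (B*(A&1));
--         A >>= 1;
--         B <<= 1;
--         if (B&0b10000):
--             B ^= 0b10011;
--     return ret;
--
-- def powGF16(A, n):
--     ret=0b0001;
--     while(n>0):
--         if n&1:
--             ret = multGF16(ret, A)
--         A = multGF16(A, A);
--         n >>= 1;
--     return ret;
-- ===== SOURCE B (Python) =====
-- # Interleaved (MSB-first, Horner-style) modular multiplication: the accumulator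
-- # is doubled and reduced each step while the operand stays fixed; the exponent
-- # loop folds over a precomputed bit list.
--
-- def multGF16(A, B):
--     if A <= 0:
--         return 0
--     r = 0
--     for i in reversed(range(A.bit_length())):
--         r <<= 1
--         if r & 0b10000:
--             r ^= 0b10011
--         if (A >> i) & 1:
--             r ^= B
--     return r
--
-- def _bits(n):
--     bs = []
--     while n > 0:
--         bs.append(n & 1)
--         n >>= 1
--     return bs
--
-- def powGF16(A, n):
--     ret = 1
--     for b in _bits(n):
--         if b:
--             ret = multGF16(ret, A)
--         A = multGF16(A, A)
--     return ret
-- ===== Notes on version B (the rewrite author's own statement) =====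
-- stated objective: alternative
-- what changed: multGF16 is replaced by the dual algorithm: interleaved MSB-first (Horner) modular multiplication that doubles and reduces the accumulator at each step while the operand B is never modified, instead of A's LSB-first scan that doubles and reduces the operand; powGF16 folds over the exponent's precomputed bit list instead of shifting the exponent in the multiply loop.
import Mathlib
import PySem

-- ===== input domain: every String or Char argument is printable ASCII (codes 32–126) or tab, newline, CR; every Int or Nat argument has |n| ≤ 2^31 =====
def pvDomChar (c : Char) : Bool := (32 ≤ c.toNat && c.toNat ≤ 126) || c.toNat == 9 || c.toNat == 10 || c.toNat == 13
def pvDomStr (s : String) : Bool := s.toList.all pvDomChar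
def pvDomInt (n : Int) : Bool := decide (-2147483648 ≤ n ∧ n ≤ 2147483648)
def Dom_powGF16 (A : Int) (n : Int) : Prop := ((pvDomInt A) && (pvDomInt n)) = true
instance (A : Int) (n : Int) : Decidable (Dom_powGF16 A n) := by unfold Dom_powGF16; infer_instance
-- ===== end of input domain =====

-- B replaces A's LSB-first operand-doubling multiplication by the dual interleaved
-- MSB-first (Horner) multiplication that doubles and reduces the accumulator, and
-- folds the exponentiation over the exponent's precomputed bit list; return values
-- are proved equal on the whole domain.

-- termination helper, cited by the recursive ports below
theorem pvShr1Lt (m : Int) (hm : 0 < m) : (m >>> (1 : Nat)).toNat < m.toNat := by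
  rw [Int.shiftRight_eq_div_pow]
  norm_num
  omega

-- ===== PORT A =====
def pvMultLoopA (A B ret : Int) : Int :=
  if 0 < A then
    pvMultLoopA (A >>> (1 : Nat))
      (let B' := B <<< (1 : Nat)
       if PySem.Int.band B' 16 ≠ 0 then PySem.Int.bxor B' 19 else B')
      (PySem.Int.bxor ret (B * PySem.Int.band A 1))
  else ret
termination_by A.toNat
decreasing_by exact pvShr1Lt A (by assumption)

def pvMultA (A B : Int) : Int := pvMultLoopA A B 0

def pvPowLoopA (A n ret : Int) : Int :=
  if 0 < n then
    pvPowLoopA (pvMultA A A) (n >>> (1 : Nat))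
      (if PySem.Int.band n 1 ≠ 0 then pvMultA ret A else ret)
  else ret
termination_by n.toNat
decreasing_by exact pvShr1Lt n (by assumption)

def powGF16 (A : Int) (n : Int) : Int := pvPowLoopA A n 1

-- ===== PORT B =====
-- one Horner step: double the accumulator and reduce
def pvDstep (r : Int) : Int :=
  let r' := r <<< (1 : Nat)
  if PySem.Int.band r' 16 ≠ 0 then PySem.Int.bxor r' 19 else r'

-- 'for i in reversed(range(t))' body of B's multGF16, processing bit i = t-1 … 0
def pvHb (A B : Int) : Nat → Int → Int
  | 0, r => r
  | i + 1, r =>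
      pvHb A B i
        (let r1 := pvDstep r
         if PySem.Int.band (A >>> i) 1 ≠ 0 then PySem.Int.bxor r1 B else r1)

def pvMultB (A B : Int) : Int :=
  if A ≤ 0 then 0 else pvHb A B A.toNat.size 0

-- '_bits(n)': the binary digits of n, least significant first
def pvBits (n : Int) : List Int :=
  if 0 < n then PySem.Int.band n 1 :: pvBits (n >>> (1 : Nat)) else []
termination_by n.toNat
decreasing_by exact pvShr1Lt n (by assumption)

def pvPowFold : List Int → Int → Int → Int
  | [], ret, _ => ret
  | b :: bs, ret, A => pvPowFold bs (if b ≠ 0 then pvMultB ret A else ret) (pvMultB A A)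

def powGF16_alt (A : Int) (n : Int) : Int := pvPowFold (pvBits n) 1 A

-- ===== PRECONDITION & SPEC =====
def Spec_powGF16 (A : Int) (n : Int) (out : Int) : Prop := out = powGF16_alt A n
instance (A : Int) (n : Int) (out : Int) : Decidable (Spec_powGF16 A n out) := by unfold Spec_powGF16; infer_instance

-- ===== CLAIM (what is proved, stated in full; the proofs are below) =====
def Claim_equal_powGF16 : Prop := ∀ (A : Int) (n : Int), Dom_powGF16 A n → Spec_powGF16 A n (powGF16 A n)

-- ===== LEMMAS AND PROOFS =====

-- every Int is pvEnc s m: s is the sign, m the two's-complement magnitude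
def pvEnc (s : Bool) (m : Nat) : Int := if s then -(m : Int) - 1 else (m : Int)

theorem pvEncSurj (x : Int) : ∃ s m, x = pvEnc s m := by
  by_cases h : 0 ≤ x
  · exact ⟨false, x.toNat, by simp [pvEnc, Int.toNat_of_nonneg h]⟩
  · refine ⟨true, (-x - 1).toNat, ?_⟩
    have h2 : (((-x - 1).toNat : Nat) : Int) = -x - 1 := Int.toNat_of_nonneg (by omega)
    simp only [pvEnc, if_true]
    rw [h2]
    omega

-- Nat xor splits over the even/odd decomposition (used for doubling)
theorem pvNxorSplit (x y u v : Nat) (hu : u < 2) (hv : v < 2) :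
    (2 * x + u) ^^^ (2 * y + v) = 2 * (x ^^^ y) + (u ^^^ v) := by
  apply Nat.eq_of_testBit_eq
  intro j
  have h2 : (2:Nat)*x+u = 2^1*x+u := by ring_nf
  have h3 : (2:Nat)*y+v = 2^1*y+v := by ring_nf
  have h4 : (2:Nat)*(x^^^y)+(u^^^v) = 2^1*(x^^^y)+(u^^^v) := by ring_nf
  rw [Nat.testBit_xor, h2, h3, h4,
    Nat.testBit_two_pow_mul_add _ (by simpa using hu),
    Nat.testBit_two_pow_mul_add _ (by simpa using hv),
    Nat.testBit_two_pow_mul_add _ (Nat.xor_lt_two_pow (by simpa using hu) (by simpa using hv))]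
  by_cases hj : j < 1
  · simp [hj, Nat.testBit_xor]
  · simp [hj, Nat.testBit_xor]

-- PySem.Int.bxor acts coordinatewise on the encoding
theorem pvBxorEnc (s t : Bool) (m n : Nat) :
    PySem.Int.bxor (pvEnc s m) (pvEnc t n) = pvEnc (s ^^ t) (m ^^^ n) := by
  have hm : ((m : Int)).toNat = m := Int.toNat_natCast m
  have hn : ((n : Int)).toNat = n := Int.toNat_natCast n
  have hm' : (-(-(m : Int) - 1) - 1).toNat = m := by
    have h : (-(-(m : Int) - 1) - 1) = (m : Int) := by ring
    rw [h, hm]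
  have hn' : (-(-(n : Int) - 1) - 1).toNat = n := by
    have h : (-(-(n : Int) - 1) - 1) = (n : Int) := by ring
    rw [h, hn]
  have hmpos : (0 : Int) ≤ (m : Int) := by positivity
  have hnpos : (0 : Int) ≤ (n : Int) := by positivity
  have hmneg : ¬ (0 : Int) ≤ -(m : Int) - 1 := by omega
  have hnneg : ¬ (0 : Int) ≤ -(n : Int) - 1 := by omega
  cases s <;> cases t
  · show PySem.Int.bxor (m : Int) (n : Int) = ((m ^^^ n : Nat) : Int)
    unfold PySem.Int.bxor
    rw [if_pos hmpos, if_pos hnpos, hm, hn]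
  · show PySem.Int.bxor (m : Int) (-(n : Int) - 1) = -((m ^^^ n : Nat) : Int) - 1
    unfold PySem.Int.bxor
    rw [if_pos hmpos, if_neg hnneg, hm, hn']
  · show PySem.Int.bxor (-(m : Int) - 1) (n : Int) = -((m ^^^ n : Nat) : Int) - 1
    unfold PySem.Int.bxor
    rw [if_neg hmneg, if_pos hnpos, hm', hn]
  · show PySem.Int.bxor (-(m : Int) - 1) (-(n : Int) - 1) = ((m ^^^ n : Nat) : Int)
    unfold PySem.Int.bxor
    rw [if_neg hmneg, if_neg hnneg, hm', hn']

theorem pvBxorAssoc (x y z : Int) :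
    PySem.Int.bxor (PySem.Int.bxor x y) z = PySem.Int.bxor x (PySem.Int.bxor y z) := by
  obtain ⟨s1, m1, rfl⟩ := pvEncSurj x
  obtain ⟨s2, m2, rfl⟩ := pvEncSurj y
  obtain ⟨s3, m3, rfl⟩ := pvEncSurj z
  rw [pvBxorEnc, pvBxorEnc, pvBxorEnc, pvBxorEnc, Bool.xor_assoc, Nat.xor_assoc]

theorem pvZeroBxor (x : Int) : PySem.Int.bxor 0 x = x := by
  rw [PySem.Int.bxor_comm]; exact PySem.Int.bxor_zero x

-- doubling on the encoding
theorem pvShlEnc (s : Bool) (m : Nat) :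
    (pvEnc s m) <<< (1 : Nat) = pvEnc s (2 * m + s.toNat) := by
  rw [Int.shiftLeft_eq]
  cases s <;> simp [pvEnc] <;> ring

-- m &&& 16 tests bit 4
theorem pvNatAnd16 (m : Nat) : m &&& 16 = if m.testBit 4 then 16 else 0 := by
  have h := Nat.and_two_pow m 4
  norm_num at h
  rw [h]
  cases hb : m.testBit 4 <;> simp

-- PySem.Int.band · 16 on the encoding
theorem pvBand16Enc (s : Bool) (m : Nat) :
    PySem.Int.band (pvEnc s m) 16 = if m.testBit 4 ^^ s then 16 else 0 := by
  cases s
  · show PySem.Int.band (m : Int) 16 = if m.testBit 4 ^^ false then 16 else 0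
    rw [PySem.Int.band_of_nonneg (by positivity) (by norm_num)]
    rw [Int.toNat_natCast]
    have h16 : ((16 : Int)).toNat = 16 := rfl
    rw [h16, pvNatAnd16]
    cases hb : m.testBit 4 <;> simp
  · show PySem.Int.band (-(m : Int) - 1) 16 = if m.testBit 4 ^^ true then 16 else 0
    have hneg : ¬ (0 : Int) ≤ -(m : Int) - 1 := by omega
    unfold PySem.Int.band
    rw [if_neg hneg, if_pos (by norm_num : (0:Int) ≤ 16)]
    have h1 : (-(-(m : Int) - 1) - 1).toNat = m := by
      have h : (-(-(m : Int) - 1) - 1) = (m : Int) := by ring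
      rw [h, Int.toNat_natCast]
    have h16 : ((16 : Int)).toNat = 16 := rfl
    rw [h1, h16, Nat.and_comm, pvNatAnd16]
    cases hb : m.testBit 4 <;> simp

-- pvDstep on the encoding
theorem pvDstepEnc (s : Bool) (m : Nat) :
    pvDstep (pvEnc s m) =
      pvEnc s ((2 * m + s.toNat) ^^^
        (if (2 * m + s.toNat).testBit 4 ^^ s then 19 else 0)) := by
  unfold pvDstep
  simp only
  rw [pvShlEnc, pvBand16Enc]
  by_cases hc : (2 * m + s.toNat).testBit 4 ^^ s
  · rw [if_pos hc, if_pos hc]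
    have h19 : (19 : Int) = pvEnc false 19 := by simp [pvEnc]
    simp only [ne_eq, OfNat.ofNat_ne_zero, not_false_eq_true, if_pos]
    rw [h19, pvBxorEnc]
    simp
  · rw [if_neg hc, if_neg hc]
    simp [Nat.xor_zero]

theorem pvNatXorLeftComm (a b c : Nat) : a ^^^ (b ^^^ c) = b ^^^ (a ^^^ c) := by
  rw [← Nat.xor_assoc, Nat.xor_comm a b, Nat.xor_assoc]

-- pvDstep is GF(2)-linear
theorem pvDstepLinear (x y : Int) :
    pvDstep (PySem.Int.bxor x y) = PySem.Int.bxor (pvDstep x) (pvDstep y) := by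
  obtain ⟨s1, m1, rfl⟩ := pvEncSurj x
  obtain ⟨s2, m2, rfl⟩ := pvEncSurj y
  rw [pvBxorEnc, pvDstepEnc, pvDstepEnc, pvDstepEnc, pvBxorEnc]
  congr 1
  have hu1 : s1.toNat < 2 := by cases s1 <;> norm_num
  have hu2 : s2.toNat < 2 := by cases s2 <;> norm_num
  have hsplit : 2 * (m1 ^^^ m2) + (s1 ^^ s2).toNat
      = (2 * m1 + s1.toNat) ^^^ (2 * m2 + s2.toNat) := by
    rw [pvNxorSplit m1 m2 s1.toNat s2.toNat hu1 hu2]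
    cases s1 <;> cases s2 <;> rfl
  rw [hsplit, Nat.testBit_xor]
  generalize (2 * m1 + s1.toNat) = X1
  generalize (2 * m2 + s2.toNat) = X2
  cases ht1 : X1.testBit 4 <;> cases ht2 : X2.testBit 4 <;> cases s1 <;> cases s2 <;>
    simp [Nat.xor_assoc, pvNatXorLeftComm, Nat.xor_self, Nat.xor_zero, Nat.xor_comm]

theorem pvDstepZero : pvDstep 0 = 0 := by decide

-- i-fold application of pvDstep, innermost first (matching A's loop descent)
def pvDpow : Nat → Int → Int
  | 0, B => B
  | i + 1, B => pvDpow i (pvDstep B)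

theorem pvDpowZeroVal : ∀ i, pvDpow i 0 = 0 := by
  intro i
  induction i with
  | zero => rfl
  | succ i ih => show pvDpow i (pvDstep 0) = 0; rw [pvDstepZero]; exact ih

theorem pvDpowLinear (i : Nat) : ∀ x y : Int,
    pvDpow i (PySem.Int.bxor x y) = PySem.Int.bxor (pvDpow i x) (pvDpow i y) := by
  induction i with
  | zero => intro x y; rfl
  | succ i ih =>
    intro x y
    show pvDpow i (pvDstep (PySem.Int.bxor x y)) = _
    rw [pvDstepLinear, ih]
    rfl

-- characterisation of A's inner loop as 'accumulator ⊕ sum'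
def pvS (A B : Int) : Int := pvMultLoopA A B 0

theorem pvMultLoopA_pos (A B ret : Int) (h : 0 < A) :
    pvMultLoopA A B ret = pvMultLoopA (A >>> (1 : Nat))
      (let B' := B <<< (1 : Nat)
       if PySem.Int.band B' 16 ≠ 0 then PySem.Int.bxor B' 19 else B')
      (PySem.Int.bxor ret (B * PySem.Int.band A 1)) := by
  rw [pvMultLoopA]; simp [h]

theorem pvMultLoopA_nonpos (A B ret : Int) (h : ¬ 0 < A) : pvMultLoopA A B ret = ret := by
  rw [pvMultLoopA]; simp [h]

-- A's inline B-update is exactly pvDstep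
theorem pvAStepEq (B : Int) :
    (let B' := B <<< (1 : Nat)
     if PySem.Int.band B' 16 ≠ 0 then PySem.Int.bxor B' 19 else B') = pvDstep B := rfl

theorem pvLoopA_acc : ∀ (N : Nat) (A B ret : Int), A.toNat ≤ N →
    pvMultLoopA A B ret = PySem.Int.bxor ret (pvS A B) := by
  intro N
  induction N with
  | zero =>
    intro A B ret hA
    have h : ¬ 0 < A := by omega
    rw [pvMultLoopA_nonpos _ _ _ h]
    unfold pvS
    rw [pvMultLoopA_nonpos _ _ _ h, PySem.Int.bxor_zero]
  | succ N ih =>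
    intro A B ret hA
    by_cases h : 0 < A
    · have hlt := pvShr1Lt A h
      have h1 := ih (A >>> (1 : Nat)) (pvDstep B)
        (PySem.Int.bxor ret (B * PySem.Int.band A 1)) (by omega)
      have h2 := ih (A >>> (1 : Nat)) (pvDstep B)
        (PySem.Int.bxor 0 (B * PySem.Int.band A 1)) (by omega)
      have h3 : pvS A B = PySem.Int.bxor (B * PySem.Int.band A 1)
          (pvS (A >>> (1 : Nat)) (pvDstep B)) := by
        show pvMultLoopA A B 0 = _
        rw [pvMultLoopA_pos _ _ _ h, pvAStepEq, h2, pvZeroBxor]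
      rw [pvMultLoopA_pos _ _ _ h, pvAStepEq, h1, h3, ← pvBxorAssoc]
    · rw [pvMultLoopA_nonpos _ _ _ h]
      unfold pvS
      rw [pvMultLoopA_nonpos _ _ _ h, PySem.Int.bxor_zero]

theorem pvS_unfold (m B : Int) (hm : 0 ≤ m) :
    pvS m B = PySem.Int.bxor (B * PySem.Int.band m 1) (pvS (m >>> (1 : Nat)) (pvDstep B)) := by
  by_cases h : 0 < m
  · show pvMultLoopA m B 0 = _
    rw [pvMultLoopA_pos _ _ _ h, pvAStepEq,
      pvLoopA_acc (m >>> (1 : Nat)).toNat _ _ _ le_rfl, pvZeroBxor]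
  · have hm0 : m = 0 := by omega
    subst hm0
    have hb : PySem.Int.band (0 : Int) 1 = 0 := by decide
    have hs : (0 : Int) >>> (1 : Nat) = 0 := by decide
    unfold pvS
    rw [pvMultLoopA_nonpos _ _ _ h, hb, hs, mul_zero,
      pvMultLoopA_nonpos _ _ _ h, PySem.Int.bxor_zero]

-- splitting off the top bit of the multiplier
theorem pvS_add_pow : ∀ (i : Nat) (m B : Int), 0 ≤ m → m < 2 ^ i →
    pvS (m + 2 ^ i) B = PySem.Int.bxor (pvS m B) (pvDpow i B) := by
  intro i
  induction i with
  | zero =>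
    intro m B hm0 hm1
    have hm : m = 0 := by norm_num at hm1; omega
    subst hm
    rw [pvS_unfold (0 + 2 ^ 0) B (by norm_num)]
    have h1 : ((0 : Int) + 2 ^ 0) = 1 := by norm_num
    rw [h1]
    have hb : PySem.Int.band (1 : Int) 1 = 1 := by decide
    have hs : (1 : Int) >>> (1 : Nat) = 0 := by decide
    have hS0 : ∀ C : Int, pvS 0 C = 0 := fun C => pvMultLoopA_nonpos 0 C 0 (by norm_num)
    rw [hb, hs, mul_one, hS0, PySem.Int.bxor_zero, hS0, pvZeroBxor]
    rfl
  | succ i ih =>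
    intro m B hm0 hm1
    have hp : (0 : Int) < 2 ^ i := by positivity
    have hpow : (2 : Int) ^ (i + 1) = 2 ^ i * 2 := by rw [pow_succ]
    have hx : 0 < m + 2 ^ (i + 1) := by rw [hpow]; nlinarith
    rw [pvS_unfold (m + 2 ^ (i + 1)) B (by omega), pvS_unfold m B hm0]
    have hband : PySem.Int.band (m + 2 ^ (i + 1)) 1 = PySem.Int.band m 1 := by
      rw [PySem.Int.band_one, PySem.Int.band_one,
        PySem.Int.mod_eq_emod_of_pos (by norm_num), PySem.Int.mod_eq_emod_of_pos (by norm_num)]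
      have : m + 2 ^ (i + 1) = m + 2 * 2 ^ i := by rw [hpow]; ring
      rw [this, Int.add_mul_emod_self_left]
    have hshift : (m + 2 ^ (i + 1)) >>> (1 : Nat) = m >>> (1 : Nat) + 2 ^ i := by
      rw [Int.shiftRight_eq_div_pow, Int.shiftRight_eq_div_pow]
      norm_num
      have : m + 2 ^ (i + 1) = m + 2 ^ i * 2 := by rw [hpow]
      rw [this, Int.add_mul_ediv_right _ _ (by norm_num : (2:Int) ≠ 0)]
    have hlo0 : 0 ≤ m >>> (1 : Nat) := by
      rw [Int.shiftRight_eq_div_pow]; positivity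
    have hlo1 : m >>> (1 : Nat) < 2 ^ i := by
      rw [Int.shiftRight_eq_div_pow]
      norm_num
      rw [Int.ediv_lt_iff_lt_mul (by norm_num : (0:Int) < 2)]
      rw [hpow] at hm1; exact hm1
    rw [hband, hshift, ih _ _ hlo0 hlo1, ← pvBxorAssoc]
    rfl

-- B's Horner loop computes the same sum
theorem pvHb_eq (A B : Int) (hA : 0 ≤ A) : ∀ (i : Nat) (r : Int),
    pvHb A B i r = PySem.Int.bxor (pvDpow i r) (pvS (A % 2 ^ i) B) := by
  intro i
  induction i with
  | zero =>
    intro r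
    show r = _
    have h1 : A % 2 ^ 0 = 0 := by norm_num [Int.emod_one]
    rw [h1]
    have hS0 : pvS 0 B = 0 := pvMultLoopA_nonpos 0 B 0 (by norm_num)
    rw [hS0, PySem.Int.bxor_zero]
    rfl
  | succ i ih =>
    intro r
    have hp : (0 : Int) < 2 ^ i := by positivity
    have hsh : A >>> (i : Nat) = A / 2 ^ i := by
      rw [Int.shiftRight_eq_div_pow]; norm_num
    have hq0 : 0 ≤ A / 2 ^ i := Int.ediv_nonneg hA (by positivity)
    have hband : PySem.Int.band (A >>> (i : Nat)) 1 = (A / 2 ^ i) % 2 := by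
      rw [PySem.Int.band_one, PySem.Int.mod_eq_emod_of_pos (by norm_num), hsh]
    -- the split of A mod 2^(i+1)
    have hR0 : 0 ≤ A % 2 ^ i := Int.emod_nonneg A (by positivity)
    have hR1 : A % 2 ^ i < 2 ^ i := Int.emod_lt_of_pos A hp
    have hsplit : A % 2 ^ (i + 1) = A % 2 ^ i + 2 ^ i * ((A / 2 ^ i) % 2) := by
      have hq : A / 2 ^ i = 2 * (A / 2 ^ i / 2) + (A / 2 ^ i) % 2 := by omega
      have hA2 : A = 2 ^ (i + 1) * (A / 2 ^ i / 2) + (A % 2 ^ i + 2 ^ i * ((A / 2 ^ i) % 2)) := by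
        have h0 : A = 2 ^ i * (A / 2 ^ i) + A % 2 ^ i := (Int.mul_ediv_add_emod A (2 ^ i)).symm
        calc A = 2 ^ i * (A / 2 ^ i) + A % 2 ^ i := h0
          _ = 2 ^ i * (2 * (A / 2 ^ i / 2) + (A / 2 ^ i) % 2) + A % 2 ^ i := by rw [← hq]
          _ = 2 ^ (i + 1) * (A / 2 ^ i / 2) + (A % 2 ^ i + 2 ^ i * ((A / 2 ^ i) % 2)) := by
              rw [pow_succ]; ring
      have hm2 : (A / 2 ^ i) % 2 = 0 ∨ (A / 2 ^ i) % 2 = 1 := Int.emod_two_eq _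
      have hbound : 0 ≤ A % 2 ^ i + 2 ^ i * ((A / 2 ^ i) % 2) ∧
          A % 2 ^ i + 2 ^ i * ((A / 2 ^ i) % 2) < 2 ^ (i + 1) := by
        have hps : (2 : Int) ^ (i + 1) = 2 ^ i * 2 := pow_succ 2 i
        rcases hm2 with h | h <;> rw [h, hps] <;> constructor <;> omega
      conv_lhs => rw [hA2, add_comm]
      rw [Int.add_mul_emod_self_left]
      exact Int.emod_eq_of_lt hbound.1 hbound.2
    show pvHb A B i _ = _
    rcases Int.emod_two_eq (A / 2 ^ i) with hb | hb
    · -- bit i is 0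
      have hcond : ¬ PySem.Int.band (A >>> (i : Nat)) 1 ≠ 0 := by rw [hband, hb]; simp
      rw [if_neg hcond]
      rw [ih (pvDstep r)]
      rw [hsplit, hb, mul_zero, add_zero]
      rfl
    · -- bit i is 1
      have hcond : PySem.Int.band (A >>> (i : Nat)) 1 ≠ 0 := by rw [hband, hb]; norm_num
      rw [if_pos hcond]
      rw [ih (PySem.Int.bxor (pvDstep r) B)]
      rw [pvDpowLinear]
      rw [hsplit, hb, mul_one]
      rw [pvS_add_pow i (A % 2 ^ i) B hR0 hR1]
      rw [pvBxorAssoc, PySem.Int.bxor_comm (pvDpow i B) (pvS (A % 2 ^ i) B)]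
      rfl

-- the two multiplications agree
theorem pvMultEq (A B : Int) : pvMultB A B = pvMultA A B := by
  unfold pvMultB pvMultA
  by_cases h : A ≤ 0
  · rw [if_pos h, pvMultLoopA_nonpos _ _ _ (by omega)]
  · have hA : 0 < A := by omega
    rw [if_neg h, pvHb_eq A B (by omega) A.toNat.size 0]
    have hlt : A < 2 ^ A.toNat.size := by
      have h1 : A.toNat < 2 ^ A.toNat.size := Nat.lt_size_self A.toNat
      have h2 : (A.toNat : Int) = A := Int.toNat_of_nonneg (by omega)
      calc A = (A.toNat : Int) := h2.symm
        _ < ((2 ^ A.toNat.size : Nat) : Int) := by exact_mod_cast h1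
        _ = 2 ^ A.toNat.size := by push_cast; ring
    rw [Int.emod_eq_of_lt (by omega) hlt, pvDpowZeroVal, pvZeroBxor]
    rfl

-- pow loop lemmas
theorem pvPowLoopA_pos (A n ret : Int) (h : 0 < n) :
    pvPowLoopA A n ret = pvPowLoopA (pvMultA A A) (n >>> (1 : Nat))
      (if PySem.Int.band n 1 ≠ 0 then pvMultA ret A else ret) := by
  rw [pvPowLoopA]; simp [h]

theorem pvPowLoopA_nonpos (A n ret : Int) (h : ¬ 0 < n) : pvPowLoopA A n ret = ret := by
  rw [pvPowLoopA]; simp [h]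

theorem pvBits_pos (n : Int) (h : 0 < n) :
    pvBits n = PySem.Int.band n 1 :: pvBits (n >>> (1 : Nat)) := by
  rw [pvBits]; simp [h]

theorem pvBits_nonpos (n : Int) (h : ¬ 0 < n) : pvBits n = [] := by
  rw [pvBits]; simp [h]

theorem pvPowEq : ∀ (N : Nat) (A n ret : Int), n.toNat ≤ N →
    pvPowFold (pvBits n) ret A = pvPowLoopA A n ret := by
  intro N
  induction N with
  | zero =>
    intro A n ret hn
    have h : ¬ 0 < n := by omega
    rw [pvBits_nonpos _ h, pvPowLoopA_nonpos _ _ _ h]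
    rfl
  | succ N ih =>
    intro A n ret hn
    by_cases h : 0 < n
    · have hlt := pvShr1Lt n h
      rw [pvBits_pos _ h, pvPowLoopA_pos _ _ _ h]
      show pvPowFold (pvBits (n >>> (1 : Nat)))
          (if PySem.Int.band n 1 ≠ 0 then pvMultB ret A else ret) (pvMultB A A) = _
      rw [pvMultEq, pvMultEq]
      by_cases hb : PySem.Int.band n 1 ≠ 0
      · rw [if_pos hb]
        exact ih _ _ _ (by omega)
      · rw [if_neg hb]
        exact ih _ _ _ (by omega)
    · rw [pvBits_nonpos _ h, pvPowLoopA_nonpos _ _ _ h]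
      rfl

-- ===== VERDICT (by name: the statement is the Claim_ definition above) =====
theorem powGF16_spec : Claim_equal_powGF16 := by
  intro A n _hDom
  unfold Spec_powGF16 powGF16 powGF16_alt
  exact (pvPowEq n.toNat A n 1 le_rfl).symm
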